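-- pv_equiv track=rewrite | github.com/ahilananantha/Advent-of-Code-2021 | day9.py | basin_bfs
-- ===== SOURCE A (Python) =====
-- from collections import deque
--
-- def find_basin_neighbors(heights, vertex):
--     def get_height(v):
--         return heights[v[0]][v[1]]
--
--     # a basin neighbor is defined as a vertex that's either one up,
--     # down, left, or right from the vertex that is of higher height.
--     # except for a height of 9, which is excluded from all basins.
--     neighbors = []
--     num_rows = len(heights)
--     num_cols = len(heights[0])
--     vertex_height = get_height(vertex)
--     if vertex[0] > 0:
--         # up vertex
--         up_vertex = (vertex[0] - 1, vertex[1])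
--         up_h = get_height(up_vertex)
--         if up_h != 9 and up_h > vertex_height:
--             neighbors.append(up_vertex)
--     if vertex[0] < num_rows - 1:
--         # down vertex
--         down_vertex = (vertex[0] + 1, vertex[1])
--         down_h = get_height(down_vertex)
--         if down_h != 9 and down_h > vertex_height:
--             neighbors.append(down_vertex)
--     if vertex[1] > 0:
--         # left vertex
--         left_vertex = (vertex[0], vertex[1] - 1)
--         left_h = get_height(left_vertex)
--         if left_h != 9 and left_h > vertex_height:
--             neighbors.append(left_vertex)
--     if vertex[1] < num_cols - 1:
--         # right vertex
--         right_vertex = (vertex[0], vertex[1] + 1)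
--         right_h = get_height(right_vertex)
--         if right_h != 9 and right_h > vertex_height:
--             neighbors.append(right_vertex)
--     return neighbors
--
-- def basin_bfs(visited, heights, low_point):
--     # While marking vertices visited we need to also calculate the size of
--     # the connected component and return it
--     if low_point in visited:
--         raise Exception(f"low point {low_point} should not already be visited")
--     q = deque([low_point])
--     visited.add(low_point)
--     basin_size = 1
--     while len(q) > 0:
--         node = q.popleft()
--         neighbors = find_basin_neighbors(heights, node)
--         for neighbor in neighbors:
--             if neighbor not in visited:
--                 q.append(neighbor)
--                 visited.add(neighbor)
--                 basin_size += 1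
--     return basin_size
-- ===== SOURCE B (Python) =====
-- def basin_bfs(visited, heights, low_point):
--     # Layered (frontier-by-frontier) flood fill: instead of a deque of
--     # individual nodes, expand the whole current frontier at once into the
--     # next layer; mutates `visited` exactly like the original (adds every
--     # reached cell).
--     if low_point in visited:
--         raise Exception(f"low point {low_point} should not already be visited")
--     num_rows = len(heights)
--     num_cols = len(heights[0])
--     visited.add(low_point)
--     size = 1
--     frontier = {low_point}
--     while frontier:
--         nxt = set()
--         for node in frontier:
--             r, c = node[0], node[1]
--             h = heights[r][c]
--             for rr, cc, ok in ((r - 1, c, r > 0),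
--                                (r + 1, c, r < num_rows - 1),
--                                (r, c - 1, c > 0),
--                                (r, c + 1, c < num_cols - 1)):
--                 if ok:
--                     hh = heights[rr][cc]
--                     if hh != 9 and hh > h and (rr, cc) not in visited:
--                         nxt.add((rr, cc))
--         visited.update(nxt)
--         size += len(nxt)
--         frontier = nxt
--     return size
-- ===== Notes on version B (the rewrite author's own statement) =====
-- stated objective: alternative
-- what changed: The deque-based node-at-a-time BFS (pop one node, scan its neighbors via the find_basin_neighbors helper, push unvisited ones) is replaced by a layered flood fill: the whole current frontier set is expanded at once into the next layer with the neighbor rule inlined over the four deltas, size grows by the layer's cardinality; reachability and hence the size are order-independent, so the result is identical.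
-- outside the precondition, e.g. on basin_bfs(set(), [[9, 9], [1]], (0, 0)): A returns 1, B returns 1
import Mathlib
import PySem

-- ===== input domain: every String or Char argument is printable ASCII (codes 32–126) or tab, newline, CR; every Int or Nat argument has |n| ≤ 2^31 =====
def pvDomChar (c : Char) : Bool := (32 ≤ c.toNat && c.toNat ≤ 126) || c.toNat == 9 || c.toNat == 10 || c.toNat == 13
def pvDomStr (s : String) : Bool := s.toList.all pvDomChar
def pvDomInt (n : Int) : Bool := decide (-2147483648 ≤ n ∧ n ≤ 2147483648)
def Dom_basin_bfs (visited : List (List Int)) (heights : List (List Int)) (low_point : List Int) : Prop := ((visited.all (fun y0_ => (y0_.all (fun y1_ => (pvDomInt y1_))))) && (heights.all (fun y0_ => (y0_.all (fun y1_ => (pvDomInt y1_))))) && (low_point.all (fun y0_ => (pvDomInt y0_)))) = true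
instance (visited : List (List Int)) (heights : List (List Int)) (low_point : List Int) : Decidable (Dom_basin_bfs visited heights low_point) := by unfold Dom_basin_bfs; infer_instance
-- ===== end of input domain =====

-- B replaces A's deque-based node-at-a-time BFS by a layered flood fill (the whole
-- frontier set is expanded at once into the next layer, with the neighbor rule inlined);
-- equivalence is about the return value (both Pythons additionally mutate `visited`,
-- and they add exactly the same elements to it).

-- ===== PORT A =====

-- heights[v[0]][v[1]]; total via default 0, Pre_ excludes inputs where Python's indexing raises
def pvGetHeight (heights : List (List Int)) (v : List Int) : Int :=
  ((PySem.List.pyGet? v 0).bind fun r =>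
    (PySem.List.pyGet? heights r).bind fun row =>
      (PySem.List.pyGet? v 1).bind fun c =>
        PySem.List.pyGet? row c).getD 0

def find_basin_neighbors (heights : List (List Int)) (vertex : List Int) : List (List Int) :=
  -- Python builds `neighbors` by up to four conditional appends, in the order
  -- up, down, left, right; we transcribe it as the concatenation of the four
  -- conditional singletons in that same order.
  let numRows : Int := heights.length
  let numCols : Int := ((PySem.List.pyGet? heights 0).getD []).length
  let r : Int := (PySem.List.pyGet? vertex 0).getD 0
  let c : Int := (PySem.List.pyGet? vertex 1).getD 0
  let vh := pvGetHeight heights vertex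
  (if r > 0 then
      (if pvGetHeight heights [r - 1, c] ≠ 9 ∧ pvGetHeight heights [r - 1, c] > vh
       then [[r - 1, c]] else []) else []) ++
  (if r < numRows - 1 then
      (if pvGetHeight heights [r + 1, c] ≠ 9 ∧ pvGetHeight heights [r + 1, c] > vh
       then [[r + 1, c]] else []) else []) ++
  (if c > 0 then
      (if pvGetHeight heights [r, c - 1] ≠ 9 ∧ pvGetHeight heights [r, c - 1] > vh
       then [[r, c - 1]] else []) else []) ++
  (if c < numCols - 1 then
      (if pvGetHeight heights [r, c + 1] ≠ 9 ∧ pvGetHeight heights [r, c + 1] > vh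
       then [[r, c + 1]] else []) else [])

-- fuel bound shared by both ports: at most 1 + |possible grid vertices| iterations are
-- ever needed (proved below); fuel is only a totality guard, Pre_ guarantees it is
-- never exhausted
def pvFuel (heights : List (List Int)) : Nat :=
  4 * heights.length * ((PySem.List.pyGet? heights 0).getD []).length + 2

-- body of A's `for neighbor in neighbors` loop: state is (queue, visited, basin_size)
def pvBfsStep (acc : List (List Int) × List (List Int) × Int) (nb : List Int) :
    List (List Int) × List (List Int) × Int :=
  if nb ∈ acc.2.1 then acc
  else (acc.1 ++ [nb], PySem.Set.add acc.2.1 nb, acc.2.2 + 1)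

def bfs_loop (heights : List (List Int)) :
    Nat → List (List Int) → List (List Int) → Int → (List (List Int) × Int)
  | 0, _, vis, n => (vis, n)
  | fuel + 1, [], vis, n => (vis, n)
  | fuel + 1, node :: rest, vis, n =>
    let s := (find_basin_neighbors heights node).foldl pvBfsStep (rest, vis, n)
    bfs_loop heights fuel s.1 s.2.1 s.2.2

def basin_bfs (visited : List (List Int)) (heights : List (List Int)) (low_point : List Int) : Int :=
  if low_point ∈ visited then 0   -- Python raises here; excluded by Pre_
  else (bfs_loop heights (pvFuel heights) [low_point] (PySem.Set.add visited low_point) 1).2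

-- ===== PORT B =====

-- the inner `for rr, cc, ok in (...)` loop of Source B: fold the four delta candidates,
-- adding each qualifying unvisited one to the layer-in-construction set
def pvScan (heights vis : List (List Int)) (vh : Int)
    (ps : List (List Int × Bool)) (acc : List (List Int)) : List (List Int) :=
  ps.foldl
    (fun acc p =>
      if p.2 = true ∧ pvGetHeight heights p.1 ≠ 9 ∧ pvGetHeight heights p.1 > vh ∧ p.1 ∉ vis
      then PySem.Set.add acc p.1 else acc) acc

-- the tuple `((r-1,c,r>0), (r+1,c,r<nr-1), (r,c-1,c>0), (r,c+1,c<nc-1))` of Source B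
def pvDeltas (heights : List (List Int)) (node : List Int) : List (List Int × Bool) :=
  let nr : Int := heights.length
  let nc : Int := ((PySem.List.pyGet? heights 0).getD []).length
  let r : Int := (PySem.List.pyGet? node 0).getD 0
  let c : Int := (PySem.List.pyGet? node 1).getD 0
  [([r - 1, c], decide (r > 0)), ([r + 1, c], decide (r < nr - 1)),
   ([r, c - 1], decide (c > 0)), ([r, c + 1], decide (c < nc - 1))]

-- one node's contribution to the next layer
def pvInner (heights vis : List (List Int)) (node : List Int) (acc : List (List Int)) :
    List (List Int) :=
  pvScan heights vis (pvGetHeight heights node) (pvDeltas heights node) acc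

-- one round of Source B's while-loop: expand the whole frontier into the next layer set
def pvRound (heights vis frontier : List (List Int)) : List (List Int) :=
  frontier.foldl (fun acc node => pvInner heights vis node acc) []

def bfs_layers (heights : List (List Int)) :
    Nat → List (List Int) → List (List Int) → Int → (List (List Int) × Int)
  | 0, _, vis, n => (vis, n)
  | fuel + 1, frontier, vis, n =>
    if frontier = [] then (vis, n)
    else
      let nxt := pvRound heights vis frontier
      bfs_layers heights fuel nxt (vis ++ nxt) (n + nxt.length)

def basin_bfs_alt (visited : List (List Int)) (heights : List (List Int)) (low_point : List Int) : Int :=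
  if low_point ∈ visited then 0   -- Python raises here; excluded by Pre_
  else (bfs_layers heights (pvFuel heights) [low_point] (PySem.Set.add visited low_point) 1).2

-- ===== PRECONDITION & SPEC =====

-- Pre_ excludes exactly the inputs on which Python A raises: a low_point that is already
-- visited (explicit raise), an empty grid, a low_point with fewer than two coordinates or
-- with a coordinate outside Python's (negative-wrapping) index range (IndexError) — plus
-- ragged grids, on a few of which A still returns (cited), because whether a mid-BFS
-- IndexError occurs there is not a closed-form condition.  visited.Nodup is the Python
-- set-representation invariant (a Python set has no duplicate elements).
def Pre_basin_bfs (visited : List (List Int)) (heights : List (List Int)) (low_point : List Int) : Prop :=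
  visited.Nodup ∧
  low_point ∉ visited ∧
  heights ≠ [] ∧
  (∀ row ∈ heights, row.length = heights.headI.length) ∧
  0 < heights.headI.length ∧
  2 ≤ low_point.length ∧
  (-(heights.length : Int) ≤ low_point.headI ∧ low_point.headI < heights.length) ∧
  (-(heights.headI.length : Int) ≤ low_point.tail.headI ∧ low_point.tail.headI < heights.headI.length)

instance (visited : List (List Int)) (heights : List (List Int)) (low_point : List Int) : Decidable (Pre_basin_bfs visited heights low_point) := by unfold Pre_basin_bfs; infer_instance

def pvWitness_basin_bfs : List (List Int) × List (List Int) × List Int :=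
  ([], [[1, 2], [9, 3]], [0, 0])

def Spec_basin_bfs (visited : List (List Int)) (heights : List (List Int)) (low_point : List Int) (out : Int) : Prop := out = basin_bfs_alt visited heights low_point
instance (visited : List (List Int)) (heights : List (List Int)) (low_point : List Int) (out : Int) : Decidable (Spec_basin_bfs visited heights low_point out) := by unfold Spec_basin_bfs; infer_instance

-- ===== CLAIM (what is proved, stated in full; the proofs are below) =====
def Claim_equal_basin_bfs : Prop := ∀ (visited : List (List Int)) (heights : List (List Int)) (low_point : List Int), Dom_basin_bfs visited heights low_point → Pre_basin_bfs visited heights low_point → Spec_basin_bfs visited heights low_point (basin_bfs visited heights low_point)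

-- ===== LEMMAS AND PROOFS =====

lemma pvColsEq (heights : List (List Int)) :
    ((PySem.List.pyGet? heights 0).getD []).length = heights.headI.length := by
  cases heights with
  | nil => rfl
  | cons h t => simp [PySem.List.pyGet?, PySem.List.pyIdx?]

-- a vertex whose two coordinates are Python-valid indices for the grid
def pvInR (heights : List (List Int)) (v : List Int) : Prop :=
  -(heights.length : Int) ≤ v.headI ∧ v.headI < heights.length ∧
  -(heights.headI.length : Int) ≤ v.tail.headI ∧ v.tail.headI < heights.headI.length

-- all two-coordinate vertices with Python-valid indices
def pvGrid (heights : List (List Int)) : List (List Int) :=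
  (List.range (2 * heights.length)).flatMap (fun (i : Nat) =>
    (List.range (2 * heights.headI.length)).map (fun (j : Nat) =>
      ([((i : Int)) - heights.length, ((j : Int)) - heights.headI.length] : List Int)))

lemma pvGrid_length (heights : List (List Int)) :
    (pvGrid heights).length = 4 * heights.length * heights.headI.length := by
  rw [pvGrid, List.length_flatMap]
  simp only [List.length_map, List.length_range]
  rw [List.map_const', List.length_range, List.sum_replicate, smul_eq_mul]
  ring

lemma mem_pvGrid (heights : List (List Int)) (a b : Int)
    (h1 : -(heights.length : Int) ≤ a) (h2 : a < heights.length)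
    (h3 : -(heights.headI.length : Int) ≤ b) (h4 : b < heights.headI.length) :
    [a, b] ∈ pvGrid heights := by
  have h5 : (a + (heights.length : Int)).toNat < 2 * heights.length := by omega
  have h6 : (b + (heights.headI.length : Int)).toNat < 2 * heights.headI.length := by omega
  refine List.mem_flatMap.mpr ⟨(a + (heights.length : Int)).toNat, List.mem_range.mpr h5,
    List.mem_map.mpr ⟨(b + (heights.headI.length : Int)).toNat, List.mem_range.mpr h6, ?_⟩⟩
  have e1 : ((a + (heights.length : Int)).toNat : Int) - heights.length = a := by omega
  have e2 : ((b + (heights.headI.length : Int)).toNat : Int) - heights.headI.length = b := by omega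
  rw [e1, e2]

-- membership characterisation of A's neighbor list
lemma mem_fbn (heights : List (List Int)) (w x : List Int) :
    x ∈ find_basin_neighbors heights w ↔
      ((x = [(PySem.List.pyGet? w 0).getD 0 - 1, (PySem.List.pyGet? w 1).getD 0] ∧
          (PySem.List.pyGet? w 0).getD 0 > 0) ∨
       (x = [(PySem.List.pyGet? w 0).getD 0 + 1, (PySem.List.pyGet? w 1).getD 0] ∧
          (PySem.List.pyGet? w 0).getD 0 < (heights.length : Int) - 1) ∨
       (x = [(PySem.List.pyGet? w 0).getD 0, (PySem.List.pyGet? w 1).getD 0 - 1] ∧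
          (PySem.List.pyGet? w 1).getD 0 > 0) ∨
       (x = [(PySem.List.pyGet? w 0).getD 0, (PySem.List.pyGet? w 1).getD 0 + 1] ∧
          (PySem.List.pyGet? w 1).getD 0 < (heights.headI.length : Int) - 1)) ∧
      pvGetHeight heights x ≠ 9 ∧ pvGetHeight heights x > pvGetHeight heights w := by
  rw [find_basin_neighbors, pvColsEq]
  simp only [List.mem_append]
  constructor
  · rintro (((h | h) | h) | h) <;>
    · split_ifs at h with g1 g2 <;>
        simp only [List.mem_cons, List.not_mem_nil, or_false] at h <;>
        subst h <;> tauto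
  · rintro ⟨(⟨hx, hg⟩ | ⟨hx, hg⟩ | ⟨hx, hg⟩ | ⟨hx, hg⟩), h9, hgt⟩ <;> subst hx
    · exact Or.inl (Or.inl (Or.inl (by rw [if_pos hg, if_pos ⟨h9, hgt⟩]; simp)))
    · exact Or.inl (Or.inl (Or.inr (by rw [if_pos hg, if_pos ⟨h9, hgt⟩]; simp)))
    · exact Or.inl (Or.inr (by rw [if_pos hg, if_pos ⟨h9, hgt⟩]; simp))
    · exact Or.inr (by rw [if_pos hg, if_pos ⟨h9, hgt⟩]; simp)

lemma pvNb_sub (heights : List (List Int)) (w u : List Int)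
    (hw : pvInR heights w) (hu : u ∈ find_basin_neighbors heights w) :
    pvInR heights u ∧ u ∈ pvGrid heights := by
  obtain ⟨hw1, hw2, hw3, hw4⟩ := hw
  have hc0 : (PySem.List.pyGet? w 0).getD 0 = w.headI := by
    cases w <;> simp [PySem.List.pyGet?, PySem.List.pyIdx?]
  have hc1 : (PySem.List.pyGet? w 1).getD 0 = w.tail.headI := by
    match w with
    | [] => simp [PySem.List.pyGet?, PySem.List.pyIdx?]
    | [a] => simp [PySem.List.pyGet?, PySem.List.pyIdx?]
    | a :: b :: t => simp [PySem.List.pyGet?, PySem.List.pyIdx?]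
  obtain ⟨hcase, -, -⟩ := (mem_fbn heights w u).mp hu
  rw [hc0, hc1] at hcase
  rcases hcase with ⟨h, hg⟩ | ⟨h, hg⟩ | ⟨h, hg⟩ | ⟨h, hg⟩ <;> subst h <;>
    exact ⟨by unfold pvInR; simp only [List.headI_cons, List.tail_cons]; omega,
           mem_pvGrid _ _ _ (by omega) (by omega) (by omega) (by omega)⟩

-- reachability: from some start in q, through strictly-rising non-9 neighbors avoiding vis
inductive PvReach (heights : List (List Int)) (vis : List (List Int)) (q : List (List Int)) :
    List Int → Prop
  | init {x : List Int} : x ∈ q → PvReach heights vis q x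
  | step {v u : List Int} : PvReach heights vis q v →
      u ∈ find_basin_neighbors heights v → u ∉ vis → PvReach heights vis q u

lemma pvReach_nil (heights : List (List Int)) (vis : List (List Int)) (x : List Int) :
    ¬ PvReach heights vis [] x := by
  intro h
  induction h with
  | init h => simp at h
  | step _ _ _ ih => exact ih

-- absorb: reachability over a grown visited set, from starts reachable over the old one
lemma pvReach_absorb (heights vis vis1 Q2 q : List (List Int)) (x : List Int)
    (hsub : ∀ y, y ∈ vis → y ∈ vis1)
    (hq : ∀ y, y ∈ q → y ∉ vis ∧ PvReach heights vis Q2 y)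
    (h : PvReach heights vis1 q x) :
    x ∈ vis ∨ PvReach heights vis Q2 x := by
  induction h with
  | init h => exact Or.inr (hq _ h).2
  | @step v u hv hnb hnv ih =>
    rcases ih with hvv | hr
    · cases hv with
      | init h => exact absurd hvv (hq _ h).1
      | step _ _ hnv' => exact absurd (hsub _ hvv) hnv'
    · exact Or.inr (.step hr hnb (fun hc => hnv (hsub _ hc)))

-- number of candidates not yet visited (the fuel budget)
def pvMissing (C vis : List (List Int)) : Nat :=
  (C.filter (fun y => decide (y ∉ vis))).length

lemma pvMissing_anti (C vis vis' : List (List Int)) (hsub : ∀ y, y ∈ vis → y ∈ vis') :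
    pvMissing C vis' ≤ pvMissing C vis := by
  induction C with
  | nil => simp [pvMissing]
  | cons c C ih =>
    unfold pvMissing at ih ⊢
    by_cases h2 : c ∈ vis
    · have h1 : c ∈ vis' := hsub _ h2
      rw [List.filter_cons_of_neg (by simp only [decide_eq_true_eq]; exact fun hc => hc h1),
          List.filter_cons_of_neg (by simp only [decide_eq_true_eq]; exact fun hc => hc h2)]
      exact ih
    · by_cases h1 : c ∈ vis'
      · rw [List.filter_cons_of_neg (by simp only [decide_eq_true_eq]; exact fun hc => hc h1),
            List.filter_cons_of_pos (by simp only [decide_eq_true_eq]; exact h2)]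
        exact Nat.le_succ_of_le ih
      · rw [List.filter_cons_of_pos (by simp only [decide_eq_true_eq]; exact h1),
            List.filter_cons_of_pos (by simp only [decide_eq_true_eq]; exact h2)]
        exact Nat.succ_le_succ ih

lemma pvMissing_lt (C vis : List (List Int)) (u : List Int) (huC : u ∈ C) (huv : u ∉ vis) :
    pvMissing C (vis ++ [u]) < pvMissing C vis := by
  have hsub : ∀ y, y ∈ vis → y ∈ vis ++ [u] := fun y hy => by simp [hy]
  induction C with
  | nil => cases huC
  | cons c C ih =>
    unfold pvMissing
    by_cases h3 : c ∈ vis ++ [u]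
    · rw [List.filter_cons_of_neg (by simp only [decide_eq_true_eq]; exact fun hc => hc h3)]
      by_cases h2 : c ∈ vis
      · rw [List.filter_cons_of_neg (by simp only [decide_eq_true_eq]; exact fun hc => hc h2)]
        rcases List.mem_cons.mp huC with hcu | hcu
        · exact absurd (hcu ▸ h2) huv
        · exact ih hcu
      · rw [List.filter_cons_of_pos (by simp only [decide_eq_true_eq]; exact h2)]
        rcases List.mem_cons.mp huC with hcu | hcu
        · subst hcu
          exact Nat.lt_succ_of_le (pvMissing_anti C vis (vis ++ [u]) hsub)
        · exact Nat.lt_succ_of_lt (ih hcu)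
    · have h2 : c ∉ vis := fun hc => h3 (hsub _ hc)
      rw [List.filter_cons_of_pos (by simp only [decide_eq_true_eq]; exact h3),
          List.filter_cons_of_pos (by simp only [decide_eq_true_eq]; exact h2)]
      have hcu : u ∈ C := by
        rcases List.mem_cons.mp huC with hcu | hcu
        · exact absurd (by simp [hcu]) h3
        · exact hcu
      exact Nat.succ_lt_succ (ih hcu)

lemma pvMissing_le_len (C vis : List (List Int)) : pvMissing C vis ≤ C.length :=
  List.length_filter_le _ _

lemma pvNodupApp (l1 l2 : List (List Int)) (h1 : l1.Nodup) (h2 : l2.Nodup)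
    (hd : ∀ x, x ∈ l2 → x ∉ l1) : (l1 ++ l2).Nodup := by
  rw [List.nodup_append]
  exact ⟨h1, h2, fun a ha b hb he => hd b hb (he ▸ ha)⟩

-- ===== BFS (A) side =====

lemma pvBfs_fold (heights : List (List Int)) (ns : List (List Int)) :
    ∀ (q vis : List (List Int)) (n : Int), vis.Nodup →
    (∃ ex, (ns.foldl pvBfsStep (q, vis, n)).2.1 = vis ++ ex ∧
           (ns.foldl pvBfsStep (q, vis, n)).1 = q ++ ex) ∧
    (ns.foldl pvBfsStep (q, vis, n)).2.1.Nodup ∧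
    (∀ x, x ∈ (ns.foldl pvBfsStep (q, vis, n)).2.1 ↔ x ∈ vis ∨ x ∈ ns) ∧
    (∀ x, x ∈ (ns.foldl pvBfsStep (q, vis, n)).1 ↔ x ∈ q ∨ (x ∈ ns ∧ x ∉ vis)) ∧
    (ns.foldl pvBfsStep (q, vis, n)).2.2
      = n + (((ns.foldl pvBfsStep (q, vis, n)).2.1.length : Int) - vis.length) ∧
    (∀ C : List (List Int), (∀ u, u ∈ ns → u ∈ C) →
      (ns.foldl pvBfsStep (q, vis, n)).1.length
        + pvMissing C (ns.foldl pvBfsStep (q, vis, n)).2.1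
        ≤ q.length + pvMissing C vis) := by
  induction ns with
  | nil =>
    intro q vis n hnd
    simp only [List.foldl_nil]
    refine ⟨⟨[], by simp, by simp⟩, hnd, ?_, ?_, by simp, ?_⟩
    · intro x; simp
    · intro x; simp
    · intro C hC; simp
  | cons u ns ih =>
    intro q vis n hnd
    rw [List.foldl_cons]
    by_cases hu : u ∈ vis
    · rw [show pvBfsStep (q, vis, n) u = (q, vis, n) from by simp [pvBfsStep, hu]]
      obtain ⟨⟨ex, he1, he2⟩, h2, h3, h4, h5, h6⟩ := ih q vis n hnd
      refine ⟨⟨ex, he1, he2⟩, h2, ?_, ?_, h5, ?_⟩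
      · intro x
        rw [h3 x, List.mem_cons]
        exact ⟨fun h => by tauto, by rintro (h | rfl | h); exacts [Or.inl h, Or.inl hu, Or.inr h]⟩
      · intro x
        rw [h4 x, List.mem_cons]
        constructor
        · rintro (h | ⟨h, h2x⟩); exacts [Or.inl h, Or.inr ⟨Or.inr h, h2x⟩]
        · rintro (h | ⟨rfl | h, h2x⟩); exacts [Or.inl h, absurd hu h2x, Or.inr ⟨h, h2x⟩]
      · intro C hC; exact h6 C (fun w hw => hC w (List.mem_cons_of_mem _ hw))
    · rw [show pvBfsStep (q, vis, n) u = (q ++ [u], vis ++ [u], n + 1) from by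
        unfold pvBfsStep
        rw [if_neg hu, PySem.Set.add_of_not_mem hu]]
      have hnd1 : (vis ++ [u]).Nodup := by
        rw [List.nodup_append]
        refine ⟨hnd, List.nodup_singleton _, ?_⟩
        intro a ha b hb
        rw [List.mem_singleton] at hb
        subst hb
        exact fun he => hu (he ▸ ha)
      obtain ⟨⟨ex, he1, he2⟩, h2, h3, h4, h5, h6⟩ := ih (q ++ [u]) (vis ++ [u]) (n + 1) hnd1
      refine ⟨⟨u :: ex, by rw [he1]; simp, by rw [he2]; simp⟩, h2, ?_, ?_, ?_, ?_⟩
      · intro x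
        rw [h3 x]
        simp only [List.mem_append, List.mem_cons, List.not_mem_nil, or_false]
        tauto
      · intro x
        rw [h4 x]
        simp only [List.mem_append, List.mem_cons, List.not_mem_nil, or_false]
        constructor
        · rintro ((h | rfl) | ⟨h, hx⟩)
          · exact Or.inl h
          · exact Or.inr ⟨Or.inl rfl, hu⟩
          · exact Or.inr ⟨Or.inr h, fun hc => hx (Or.inl hc)⟩
        · rintro (h | ⟨rfl | h, hx⟩)
          · exact Or.inl (Or.inl h)
          · exact Or.inl (Or.inr rfl)
          · by_cases hxu : x = u
            · exact Or.inl (Or.inr hxu)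
            · exact Or.inr ⟨h, not_or.mpr ⟨hx, hxu⟩⟩
      · rw [h5]
        simp only [List.length_append, List.length_cons, List.length_nil]
        push_cast
        ring
      · intro C hC
        have h7 := h6 C (fun w hw => hC w (List.mem_cons_of_mem _ hw))
        have h8 : pvMissing C (vis ++ [u]) < pvMissing C vis :=
          pvMissing_lt C vis u (hC u (by simp)) hu
        refine le_trans h7 ?_
        simp only [List.length_append, List.length_cons, List.length_nil]
        omega

lemma pvBfs_ok (heights C : List (List Int))
    (hCnb : ∀ w u, pvInR heights w → u ∈ find_basin_neighbors heights w →
            pvInR heights u ∧ u ∈ C) :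
    ∀ (fuel : Nat) (q vis : List (List Int)) (n : Int), vis.Nodup →
    (∀ x, x ∈ q → x ∈ vis) → (∀ x, x ∈ q → pvInR heights x) →
    q.length + pvMissing C vis ≤ fuel →
    (∃ ex, (bfs_loop heights fuel q vis n).1 = vis ++ ex) ∧
    (bfs_loop heights fuel q vis n).1.Nodup ∧
    (∀ x, x ∈ (bfs_loop heights fuel q vis n).1 ↔ x ∈ vis ∨ PvReach heights vis q x) ∧
    (bfs_loop heights fuel q vis n).2
      = n + (((bfs_loop heights fuel q vis n).1.length : Int) - vis.length) := by
  intro fuel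
  induction fuel with
  | zero =>
    intro q vis n hnd hqv hqr hfuel
    have hq : q = [] := by
      cases q with
      | nil => rfl
      | cons a t => simp only [List.length_cons] at hfuel; omega
    subst hq
    rw [bfs_loop]
    refine ⟨⟨[], by simp⟩, hnd, ?_, by simp⟩
    intro x
    exact ⟨Or.inl, fun h => h.elim id (fun hr => absurd hr (pvReach_nil heights vis x))⟩
  | succ fuel ih =>
    intro q vis n hnd hqv hqr hfuel
    cases q with
    | nil =>
      rw [bfs_loop]
      refine ⟨⟨[], by simp⟩, hnd, ?_, by simp⟩
      intro x
      exact ⟨Or.inl, fun h => h.elim id (fun hr => absurd hr (pvReach_nil heights vis x))⟩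
    | cons node rest =>
      rw [bfs_loop]
      obtain ⟨⟨ex, he1, he2⟩, fnd, fvis, fq, fcnt, ffuel⟩ :=
        pvBfs_fold heights (find_basin_neighbors heights node) rest vis n hnd
      set s := (find_basin_neighbors heights node).foldl pvBfsStep (rest, vis, n) with hs
      have hinnode : pvInR heights node := hqr node (by simp)
      have hnsC : ∀ w, w ∈ find_basin_neighbors heights node → w ∈ C :=
        fun w hw => (hCnb node w hinnode hw).2
      have hq1v : ∀ x, x ∈ s.1 → x ∈ s.2.1 := by
        intro x hx
        rcases (fq x).mp hx with h | ⟨h1, h2⟩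
        · exact (fvis x).mpr (Or.inl (hqv x (List.mem_cons_of_mem _ h)))
        · exact (fvis x).mpr (Or.inr h1)
      have hq1r : ∀ x, x ∈ s.1 → pvInR heights x := by
        intro x hx
        rcases (fq x).mp hx with h | ⟨h1, h2⟩
        · exact hqr x (List.mem_cons_of_mem _ h)
        · exact (hCnb node x hinnode h1).1
      have hfuel1 : s.1.length + pvMissing C s.2.1 ≤ fuel := by
        have h7 := ffuel C hnsC
        simp only [List.length_cons] at hfuel
        omega
      obtain ⟨⟨ex2, hex2⟩, ind, ichar, icnt⟩ := ih s.1 s.2.1 s.2.2 fnd hq1v hq1r hfuel1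
      have hnodevis : node ∈ vis := hqv node (by simp)
      have hP1 : ∀ x, PvReach heights s.2.1 s.1 x → PvReach heights vis (node :: rest) x := by
        intro x hx
        induction hx with
        | init h =>
          rcases (fq _).mp h with h' | ⟨h1, h2⟩
          · exact .init (List.mem_cons_of_mem _ h')
          · exact .step (.init (by simp)) h1 h2
        | step hv hnb hnv ihx =>
          exact .step ihx hnb (fun hc => hnv ((fvis _).mpr (Or.inl hc)))
      have hP2 : ∀ x, PvReach heights vis (node :: rest) x →
          x ∈ s.2.1 ∨ PvReach heights s.2.1 s.1 x := by
        intro x hx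
        induction hx with
        | init h =>
          rcases List.mem_cons.mp h with rfl | h'
          · exact Or.inl ((fvis _).mpr (Or.inl hnodevis))
          · exact Or.inr (.init ((fq _).mpr (Or.inl h')))
        | @step v u hv hnb hnv ihx =>
          by_cases hu1 : u ∈ s.2.1
          · exact Or.inl hu1
          · refine Or.inr ?_
            rcases ihx with hv1 | hr1
            · cases hv with
              | init h' =>
                rcases List.mem_cons.mp h' with rfl | h''
                · exact absurd ((fvis u).mpr (Or.inr hnb)) hu1
                · exact .step (.init ((fq _).mpr (Or.inl h''))) hnb hu1
              | step hv' hnb' hnv' =>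
                have hvns : v ∈ find_basin_neighbors heights node :=
                  ((fvis v).mp hv1).resolve_left hnv'
                exact .step (.init ((fq _).mpr (Or.inr ⟨hvns, hnv'⟩))) hnb hu1
            · exact .step hr1 hnb hu1
      refine ⟨⟨ex ++ ex2, by rw [hex2, he1, List.append_assoc]⟩, ind, ?_, ?_⟩
      · intro x
        rw [ichar x]
        constructor
        · rintro (hx | hr)
          · rcases (fvis x).mp hx with h | h
            · exact Or.inl h
            · by_cases hxv : x ∈ vis
              · exact Or.inl hxv
              · exact Or.inr (.step (.init (by simp)) h hxv)
          · exact Or.inr (hP1 x hr)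
        · rintro (hx | hr)
          · exact Or.inl ((fvis x).mpr (Or.inl hx))
          · exact hP2 x hr
      · rw [icnt, fcnt]
        ring

-- ===== layered (B) side =====

lemma pvScan_cons (heights vis : List (List Int)) (vh : Int)
    (p : List Int × Bool) (ps : List (List Int × Bool)) (acc : List (List Int)) :
    pvScan heights vis vh (p :: ps) acc =
      pvScan heights vis vh ps
        (if p.2 = true ∧ pvGetHeight heights p.1 ≠ 9 ∧ pvGetHeight heights p.1 > vh ∧ p.1 ∉ vis
         then PySem.Set.add acc p.1 else acc) := rfl

lemma pvScan_ok (heights vis : List (List Int)) (vh : Int) :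
    ∀ (ps : List (List Int × Bool)) (acc : List (List Int)), acc.Nodup →
    (pvScan heights vis vh ps acc).Nodup ∧
    ∀ x, x ∈ pvScan heights vis vh ps acc ↔
      x ∈ acc ∨ ((pvGetHeight heights x ≠ 9 ∧ pvGetHeight heights x > vh ∧
                  ∃ p ∈ ps, x = p.1 ∧ p.2 = true) ∧ x ∉ vis) := by
  intro ps
  induction ps with
  | nil =>
    intro acc hnd
    refine ⟨hnd, ?_⟩
    intro x
    simp [pvScan]
  | cons p ps ih =>
    intro acc hnd
    rw [pvScan_cons]
    by_cases hc : p.2 = true ∧ pvGetHeight heights p.1 ≠ 9 ∧ pvGetHeight heights p.1 > vh ∧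
        p.1 ∉ vis
    · rw [if_pos hc]
      obtain ⟨ind, ichar⟩ := ih (PySem.Set.add acc p.1) (PySem.Set.nodup_add _ _ hnd)
      refine ⟨ind, ?_⟩
      intro x
      rw [ichar x, PySem.Set.mem_add]
      constructor
      · rintro ((hx | rfl) | ⟨⟨h9, hg, q, hq, rfl, hq2⟩, hnv⟩)
        · exact Or.inl hx
        · exact Or.inr ⟨⟨hc.2.1, hc.2.2.1, p, by simp, rfl, hc.1⟩, hc.2.2.2⟩
        · exact Or.inr ⟨⟨h9, hg, q, List.mem_cons_of_mem _ hq, rfl, hq2⟩, hnv⟩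
      · rintro (hx | ⟨⟨h9, hg, q, hq, rfl, hq2⟩, hnv⟩)
        · exact Or.inl (Or.inl hx)
        · rcases List.mem_cons.mp hq with rfl | hq'
          · exact Or.inl (Or.inr rfl)
          · exact Or.inr ⟨⟨h9, hg, q, hq', rfl, hq2⟩, hnv⟩
    · rw [if_neg hc]
      obtain ⟨ind, ichar⟩ := ih acc hnd
      refine ⟨ind, ?_⟩
      intro x
      rw [ichar x]
      constructor
      · rintro (hx | ⟨⟨h9, hg, q, hq, rfl, hq2⟩, hnv⟩)
        · exact Or.inl hx
        · exact Or.inr ⟨⟨h9, hg, q, List.mem_cons_of_mem _ hq, rfl, hq2⟩, hnv⟩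
      · rintro (hx | ⟨⟨h9, hg, q, hq, rfl, hq2⟩, hnv⟩)
        · exact Or.inl hx
        · rcases List.mem_cons.mp hq with rfl | hq'
          · exact absurd ⟨hq2, h9, hg, hnv⟩ hc
          · exact Or.inr ⟨⟨h9, hg, q, hq', rfl, hq2⟩, hnv⟩

-- B's four candidate tuples qualify exactly when A's neighbor list contains the vertex
lemma pvDeltas_fbn (heights : List (List Int)) (node x : List Int) :
    (pvGetHeight heights x ≠ 9 ∧ pvGetHeight heights x > pvGetHeight heights node ∧
     ∃ p ∈ pvDeltas heights node, x = p.1 ∧ p.2 = true) ↔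
    x ∈ find_basin_neighbors heights node := by
  rw [mem_fbn]
  rw [pvDeltas, pvColsEq]
  simp only [List.mem_cons, List.not_mem_nil, or_false]
  constructor
  · rintro ⟨h9, hg, q, hq, rfl, hq2⟩
    rcases hq with rfl | rfl | rfl | rfl
    · exact ⟨Or.inl ⟨rfl, of_decide_eq_true hq2⟩, h9, hg⟩
    · exact ⟨Or.inr (Or.inl ⟨rfl, of_decide_eq_true hq2⟩), h9, hg⟩
    · exact ⟨Or.inr (Or.inr (Or.inl ⟨rfl, of_decide_eq_true hq2⟩)), h9, hg⟩
    · exact ⟨Or.inr (Or.inr (Or.inr ⟨rfl, of_decide_eq_true hq2⟩)), h9, hg⟩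
  · rintro ⟨(⟨rfl, hg⟩ | ⟨rfl, hg⟩ | ⟨rfl, hg⟩ | ⟨rfl, hg⟩), h9, hgt⟩
    · exact ⟨h9, hgt, _, Or.inl rfl, rfl, decide_eq_true hg⟩
    · exact ⟨h9, hgt, _, Or.inr (Or.inl rfl), rfl, decide_eq_true hg⟩
    · exact ⟨h9, hgt, _, Or.inr (Or.inr (Or.inl rfl)), rfl, decide_eq_true hg⟩
    · exact ⟨h9, hgt, _, Or.inr (Or.inr (Or.inr rfl)), rfl, decide_eq_true hg⟩

lemma pvInner_char (heights vis : List (List Int)) (node : List Int)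
    (acc : List (List Int)) (hnd : acc.Nodup) :
    (pvInner heights vis node acc).Nodup ∧
    ∀ x, x ∈ pvInner heights vis node acc ↔
      x ∈ acc ∨ (x ∈ find_basin_neighbors heights node ∧ x ∉ vis) := by
  obtain ⟨hnd', hchar⟩ :=
    pvScan_ok heights vis (pvGetHeight heights node) (pvDeltas heights node) acc hnd
  refine ⟨hnd', ?_⟩
  intro x
  rw [pvInner, hchar x, ← pvDeltas_fbn heights node x]

lemma pvRound_ok (heights vis : List (List Int)) (frontier : List (List Int)) :
    (pvRound heights vis frontier).Nodup ∧
    ∀ x, x ∈ pvRound heights vis frontier ↔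
      (∃ v ∈ frontier, x ∈ find_basin_neighbors heights v) ∧ x ∉ vis := by
  have main : ∀ (fr acc : List (List Int)), acc.Nodup →
      (fr.foldl (fun acc node => pvInner heights vis node acc) acc).Nodup ∧
      ∀ x, x ∈ fr.foldl (fun acc node => pvInner heights vis node acc) acc ↔
        x ∈ acc ∨ ((∃ v ∈ fr, x ∈ find_basin_neighbors heights v) ∧ x ∉ vis) := by
    intro fr
    induction fr with
    | nil =>
      intro acc hnd
      refine ⟨hnd, ?_⟩
      intro x
      simp
    | cons v fr ih =>
      intro acc hnd
      rw [List.foldl_cons]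
      obtain ⟨hnd1, hchar1⟩ := pvInner_char heights vis v acc hnd
      obtain ⟨hnd2, hchar2⟩ := ih (pvInner heights vis v acc) hnd1
      refine ⟨hnd2, ?_⟩
      intro x
      rw [hchar2 x, hchar1 x]
      constructor
      · rintro ((hx | ⟨hnb, hnv⟩) | ⟨⟨w, hw, hnb⟩, hnv⟩)
        · exact Or.inl hx
        · exact Or.inr ⟨⟨v, by simp, hnb⟩, hnv⟩
        · exact Or.inr ⟨⟨w, List.mem_cons_of_mem _ hw, hnb⟩, hnv⟩
      · rintro (hx | ⟨⟨w, hw, hnb⟩, hnv⟩)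
        · exact Or.inl (Or.inl hx)
        · rcases List.mem_cons.mp hw with rfl | hw'
          · exact Or.inl (Or.inr ⟨hnb, hnv⟩)
          · exact Or.inr ⟨⟨w, hw', hnb⟩, hnv⟩
  obtain ⟨hnd, hchar⟩ := main frontier [] List.nodup_nil
  refine ⟨hnd, ?_⟩
  intro x
  rw [pvRound, hchar x]
  simp

lemma bfs_layers_empty (heights : List (List Int)) (fuel : Nat)
    (vis : List (List Int)) (n : Int) :
    bfs_layers heights fuel [] vis n = (vis, n) := by
  cases fuel with
  | zero => rfl
  | succ fuel => rw [bfs_layers, if_pos rfl]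

lemma pvLayers_ok (heights C : List (List Int))
    (hCnb : ∀ w u, pvInR heights w → u ∈ find_basin_neighbors heights w →
            pvInR heights u ∧ u ∈ C) :
    ∀ (fuel : Nat) (frontier vis : List (List Int)) (n : Int), vis.Nodup →
    (∀ x, x ∈ frontier → x ∈ vis) → (∀ x, x ∈ frontier → pvInR heights x) →
    pvMissing C vis < fuel →
    (∃ ex, (bfs_layers heights fuel frontier vis n).1 = vis ++ ex) ∧
    (bfs_layers heights fuel frontier vis n).1.Nodup ∧
    (∀ x, x ∈ (bfs_layers heights fuel frontier vis n).1 ↔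
        x ∈ vis ∨ PvReach heights vis frontier x) ∧
    (bfs_layers heights fuel frontier vis n).2
      = n + (((bfs_layers heights fuel frontier vis n).1.length : Int) - vis.length) := by
  intro fuel
  induction fuel with
  | zero =>
    intro frontier vis n hnd hfv hfr hfuel
    exact absurd hfuel (Nat.not_lt_zero _)
  | succ fuel ih =>
    intro frontier vis n hnd hfv hfr hfuel
    by_cases hf : frontier = []
    · subst hf
      rw [bfs_layers_empty]
      refine ⟨⟨[], by simp⟩, hnd, ?_, by simp⟩
      intro x
      exact ⟨Or.inl, fun h => h.elim id (fun hr => absurd hr (pvReach_nil heights vis x))⟩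
    · rw [bfs_layers, if_neg hf]
      obtain ⟨rnd, rchar⟩ := pvRound_ok heights vis frontier
      set nxt := pvRound heights vis frontier with hnxt
      have hnxtnv : ∀ x, x ∈ nxt → x ∉ vis := fun x hx => ((rchar x).mp hx).2
      have hnxtR : ∀ x, x ∈ nxt → pvInR heights x ∧ x ∈ C := by
        intro x hx
        obtain ⟨⟨v, hv, hnb⟩, -⟩ := (rchar x).mp hx
        exact hCnb v x (hfr v hv) hnb
      have hndv' : (vis ++ nxt).Nodup := pvNodupApp vis nxt hnd rnd hnxtnv
      by_cases hn : nxt = []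
      · rw [hn]
        rw [bfs_layers_empty]
        simp only [List.append_nil, List.length_nil]
        have hre : ∀ x, PvReach heights vis frontier x → x ∈ vis := by
          intro x hx
          induction hx with
          | init h => exact hfv _ h
          | @step v u hv hnb hnv ihx =>
            exfalso
            cases hv with
            | init h' =>
              have : u ∈ nxt := (rchar u).mpr ⟨⟨v, h', hnb⟩, hnv⟩
              rw [hn] at this
              simp at this
            | step _ _ hnv' => exact hnv' ihx
        refine ⟨⟨[], by simp⟩, hnd, ?_, by push_cast; ring⟩
        intro x
        exact ⟨Or.inl, fun h => h.elim id (hre x)⟩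
      · obtain ⟨u, hu⟩ := List.exists_mem_of_ne_nil nxt hn
        have hfuel' : pvMissing C (vis ++ nxt) < fuel := by
          have h1 : pvMissing C (vis ++ nxt) ≤ pvMissing C (vis ++ [u]) := by
            refine pvMissing_anti C (vis ++ [u]) (vis ++ nxt) ?_
            intro y hy
            rcases List.mem_append.mp hy with hy | hy
            · exact List.mem_append_left _ hy
            · rw [List.mem_singleton] at hy
              exact List.mem_append_right _ (hy ▸ hu)
          have h2 : pvMissing C (vis ++ [u]) < pvMissing C vis :=
            pvMissing_lt C vis u (hnxtR u hu).2 (hnxtnv u hu)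
          omega
        obtain ⟨⟨ex2, hex2⟩, ind, ichar, icnt⟩ :=
          ih nxt (vis ++ nxt) (n + nxt.length) hndv'
            (fun x hx => List.mem_append_right _ hx)
            (fun x hx => (hnxtR x hx).1) hfuel'
        have hfwd : ∀ x, PvReach heights vis frontier x →
            x ∈ vis ++ nxt ∨ PvReach heights (vis ++ nxt) nxt x := by
          intro x hx
          induction hx with
          | init h => exact Or.inl (List.mem_append_left _ (hfv _ h))
          | @step v w hv hnb hnv ihx =>
            by_cases hw' : w ∈ vis ++ nxt
            · exact Or.inl hw'
            · rcases ihx with hvm | hvr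
              · rcases List.mem_append.mp hvm with hvv | hvn
                · cases hv with
                  | init h' =>
                    exact absurd
                      (List.mem_append_right _ ((rchar w).mpr ⟨⟨v, h', hnb⟩, hnv⟩)) hw'
                  | step _ _ hnv' => exact absurd hvv hnv'
                · exact Or.inr (.step (.init hvn) hnb hw')
              · exact Or.inr (.step hvr hnb hw')
        refine ⟨⟨nxt ++ ex2, by rw [hex2, List.append_assoc]⟩, ind, ?_, ?_⟩
        · intro x
          rw [ichar x]
          constructor
          · rintro (hx | hr)
            · rcases List.mem_append.mp hx with hx | hx
              · exact Or.inl hx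
              · obtain ⟨⟨v, hv, hnb⟩, hnv⟩ := (rchar x).mp hx
                exact Or.inr (.step (.init hv) hnb hnv)
            · refine pvReach_absorb heights vis (vis ++ nxt) frontier nxt x
                (fun y hy => List.mem_append_left _ hy) ?_ hr
              intro y hy
              obtain ⟨⟨v, hv, hnb⟩, hnv⟩ := (rchar y).mp hy
              exact ⟨hnv, .step (.init hv) hnb hnv⟩
          · rintro (hx | hr)
            · exact Or.inl (List.mem_append_left _ hx)
            · exact hfwd x hr
        · rw [icnt]
          simp only [List.length_append]
          push_cast
          ring

-- ===== VERDICT (by name: the statement is the Claim_ definition above) =====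
theorem basin_bfs_spec : Claim_equal_basin_bfs := by
  intro visited heights low_point hdom hpre
  obtain ⟨hnd, hlv, hne, hrect, hcols, hlplen, ⟨hr1, hr2⟩, ⟨hc1, hc2⟩⟩ := hpre
  unfold Spec_basin_bfs basin_bfs basin_bfs_alt
  rw [if_neg hlv, if_neg hlv, PySem.Set.add_of_not_mem hlv]
  have hCnb : ∀ w u, pvInR heights w → u ∈ find_basin_neighbors heights w →
      pvInR heights u ∧ u ∈ pvGrid heights ++ [low_point] := by
    intro w u hw hu
    obtain ⟨h1, h2⟩ := pvNb_sub heights w u hw hu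
    exact ⟨h1, List.mem_append_left _ h2⟩
  have hlpR : pvInR heights low_point := ⟨hr1, hr2, hc1, hc2⟩
  have hfuel_eq : pvFuel heights = 4 * heights.length * heights.headI.length + 2 := by
    rw [pvFuel, pvColsEq]
  have hmissC : pvMissing (pvGrid heights ++ [low_point]) visited
      ≤ 4 * heights.length * heights.headI.length + 1 := by
    have h1 := pvMissing_le_len (pvGrid heights ++ [low_point]) visited
    have h2 := pvGrid_length heights
    simp only [List.length_append, List.length_cons, List.length_nil] at h1
    omega
  have hndA : (visited ++ [low_point]).Nodup :=
    pvNodupApp visited [low_point] hnd (List.nodup_singleton _)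
      (fun x hx => by rw [List.mem_singleton] at hx; exact hx ▸ hlv)
  have hstartv : ∀ x, x ∈ [low_point] → x ∈ visited ++ [low_point] := by
    intro x hx
    rw [List.mem_singleton] at hx
    subst hx
    simp
  have hstartr : ∀ x, x ∈ [low_point] → pvInR heights x := by
    intro x hx
    rw [List.mem_singleton] at hx
    subst hx
    exact hlpR
  have hmiss1 : pvMissing (pvGrid heights ++ [low_point]) (visited ++ [low_point])
      ≤ pvMissing (pvGrid heights ++ [low_point]) visited :=
    pvMissing_anti _ visited (visited ++ [low_point]) (fun y hy => List.mem_append_left _ hy)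
  have hfuelA : [low_point].length
      + pvMissing (pvGrid heights ++ [low_point]) (visited ++ [low_point])
        ≤ pvFuel heights := by
    rw [hfuel_eq]
    simp only [List.length_cons, List.length_nil]
    omega
  obtain ⟨⟨exA, hexA⟩, hndAf, hcharA, hcntA⟩ :=
    pvBfs_ok heights (pvGrid heights ++ [low_point]) hCnb (pvFuel heights) [low_point]
      (visited ++ [low_point]) 1 hndA hstartv hstartr hfuelA
  have hfuelB : pvMissing (pvGrid heights ++ [low_point]) (visited ++ [low_point])
      < pvFuel heights := by
    rw [hfuel_eq]
    omega
  obtain ⟨⟨exB, hexB⟩, hndBf, hcharB, hcntB⟩ :=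
    pvLayers_ok heights (pvGrid heights ++ [low_point]) hCnb (pvFuel heights) [low_point]
      (visited ++ [low_point]) 1 hndA hstartv hstartr hfuelB
  have hmem : ∀ x, x ∈ (bfs_loop heights (pvFuel heights) [low_point]
        (visited ++ [low_point]) 1).1
      ↔ x ∈ (bfs_layers heights (pvFuel heights) [low_point]
        (visited ++ [low_point]) 1).1 := by
    intro x
    rw [hcharA x, hcharB x]
  have hperm := (List.perm_ext_iff_of_nodup hndAf hndBf).mpr hmem
  have hLL := hperm.length_eq
  rw [hcntA, hcntB, hLL]
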